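-- pv_equiv track=rewrite | github.com/Meiirzhan28/itransition-task3 | game.py | game_logic
-- ===== SOURCE A (Python) =====
-- def game_logic(num):
--     matrix = [["" for _ in range(len(num))] for _ in range(len(num))]
--     for i in range(len(num)):
--         for j in range(len(num)):
--             if i == j:
--                 matrix[i][j] = "Draw"
--             else:
--                 diff = (j - i) % len(num)
--                 if diff <= len(num) // 2:
--                     matrix[i][j] = "Win"
--                 else:
--                     matrix[i][j] = "Lose"
--     return matrix
-- ===== SOURCE B (Python) =====
-- def game_logic(num):
--     n = len(num)
--     half = n // 2
--     row = ["Draw"] + ["Win"] * half + ["Lose"] * (n - 1 - half)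
--     matrix = []
--     for _ in range(n):
--         matrix.append(row)
--         row = row[-1:] + row[:-1]
--     return matrix
-- ===== Notes on version B (the rewrite author's own statement) =====
-- stated objective: faster
-- what changed: B never computes a per-cell value: it builds row 0 once by list repetition (Draw, then n//2 Wins, then Loses) and generates each subsequent row by rotating the previous row right by one (row[-1:]+row[:-1]), exploiting that the matrix is circulant; A computes every cell independently with a diagonal test, a mod and a comparison over a preallocated mutable matrix.
import Mathlib
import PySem

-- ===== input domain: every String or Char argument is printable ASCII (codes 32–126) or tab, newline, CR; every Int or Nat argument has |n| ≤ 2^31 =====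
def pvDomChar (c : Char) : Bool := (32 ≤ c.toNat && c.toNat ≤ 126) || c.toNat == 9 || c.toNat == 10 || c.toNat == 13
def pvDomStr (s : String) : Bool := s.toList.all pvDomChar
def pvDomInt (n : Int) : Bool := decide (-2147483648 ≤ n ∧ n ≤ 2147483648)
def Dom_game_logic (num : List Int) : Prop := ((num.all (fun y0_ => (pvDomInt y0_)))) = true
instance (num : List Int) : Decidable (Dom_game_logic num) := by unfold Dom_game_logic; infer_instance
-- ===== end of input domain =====

-- B builds row 0 once by list repetition and derives every further row by rotating the
-- previous row right by one (the matrix is circulant) — a different construction, no per-cell work.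

-- ===== PORT A =====
-- A: preallocate an n×n matrix of "", then set each cell by a diagonal test / comparison.
def game_logic (num : List Int) : List (List String) :=
  let matrix : List (List String) :=
    (PySem.List.pyRange 0 (num.length : Int) 1).map
      (fun _ => (PySem.List.pyRange 0 (num.length : Int) 1).map (fun _ => ""))
  (PySem.List.pyRange 0 (num.length : Int) 1).foldl (fun m i =>
    (PySem.List.pyRange 0 (num.length : Int) 1).foldl (fun m j =>
      PySem.List.pySetD m i
        (PySem.List.pySetD (PySem.List.pyGetD m i [])
          j
          (if i = j then "Draw"
           else if PySem.Int.mod (j - i) (num.length : Int) ≤ PySem.Int.floordiv (num.length : Int) 2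
                then "Win" else "Lose"))) m) matrix

-- ===== PORT B =====
-- B: row 0 by repetition, each next row = previous row rotated right by one
-- (row[-1:] + row[:-1]); append rows as the loop goes.
def game_logic_alt (num : List Int) : List (List String) :=
  let n : Nat := num.length
  let half : Nat := n / 2
  let row : List String :=
    ["Draw"] ++ List.replicate half "Win" ++ List.replicate (n - 1 - half) "Lose"
  ((PySem.List.pyRange 0 (n : Int) 1).foldl
      (fun (st : List (List String) × List String) _ =>
        (st.1 ++ [st.2],
         PySem.List.slice st.2 (some (-1)) none ++ PySem.List.slice st.2 none (some (-1))))
      ([], row)).1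

-- ===== PRECONDITION & SPEC =====
def Spec_game_logic (num : List Int) (out : List (List String)) : Prop := out = game_logic_alt num
instance (num : List Int) (out : List (List String)) : Decidable (Spec_game_logic num out) := by unfold Spec_game_logic; infer_instance

-- ===== CLAIM (what is proved, stated in full; the proofs are below) =====
def Claim_equal_game_logic : Prop := ∀ (num : List Int), Dom_game_logic num → Spec_game_logic num (game_logic num)

-- ===== LEMMAS AND PROOFS =====

-- A's per-cell branch, as a named function (definitionally the port's ite).
def pvCell (n : Int) (i j : Int) : String :=
  if i = j then "Draw"
  else if PySem.Int.mod (j - i) n ≤ PySem.Int.floordiv n 2 then "Win" else "Lose"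

-- B's rotate-right step, as a named function (definitionally the port's lambda body).
def pvRot (r : List String) : List String :=
  PySem.List.slice r (some (-1)) none ++ PySem.List.slice r none (some (-1))

-- foldl respects an invariant-preserving pointwise replacement of its step function
theorem pv_foldl_congr_inv {α β : Type} (P : α → Prop) (f g : α → β → α) (l : List β) (a : α)
    (hP : P a) (hpres : ∀ x b, P x → P (f x b)) (hfg : ∀ x b, b ∈ l → P x → f x b = g x b) :
    l.foldl f a = l.foldl g a := by
  induction l generalizing a with
  | nil => rfl
  | cons b t ih =>
    simp only [List.foldl_cons]
    rw [← hfg a b (by simp) hP]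
    exact ih (f a b) (hpres a b hP) (fun x c hc hx => hfg x c (by simp [hc]) hx)

-- the inner j-loop, which re-sets row i at every step, equals one set of row i
-- to the row built by a plain index-setting loop
theorem pv_inner_comm (i : Int) (f : Int → String) (js : List Int) :
    ∀ (m : List (List String)), 0 ≤ i → i < (m.length : Int) →
      js.foldl (fun m j =>
          PySem.List.pySetD m i (PySem.List.pySetD (PySem.List.pyGetD m i []) j (f j))) m
        = PySem.List.pySetD m i
            (js.foldl (fun r j => PySem.List.pySetD r j (f j)) (PySem.List.pyGetD m i [])) := by
  induction js with
  | nil =>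
    intro m h0 h1
    have hlt : i.toNat < m.length := by omega
    simp only [List.foldl_nil]
    rw [PySem.List.pySetD_of_nonneg _ _ h0, PySem.List.pyGetD_eq_getElem _ _ h0 h1]
    exact (List.set_getElem_self hlt).symm
  | cons j t ih =>
    intro m h0 h1
    have hlt : i.toNat < m.length := by omega
    simp only [List.foldl_cons]
    rw [ih _ h0 (by rw [PySem.List.length_pySetD]; omega)]
    have hgs : PySem.List.pyGetD
        (PySem.List.pySetD m i (PySem.List.pySetD (PySem.List.pyGetD m i []) j (f j))) i []
        = PySem.List.pySetD (PySem.List.pyGetD m i []) j (f j) := by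
      rw [PySem.List.pySetD_of_nonneg _ _ h0,
          PySem.List.pyGetD_eq_getElem _ _ h0 (by rw [List.length_set]; omega)]
      exact List.getElem_set_self (by rw [List.length_set]; omega)
    rw [hgs, PySem.List.pySetD_of_nonneg _ _ h0, PySem.List.pySetD_of_nonneg _ _ h0,
        PySem.List.pySetD_of_nonneg _ _ h0, List.set_set]

-- a foldl preserves an invariant of its state
theorem pv_foldl_pres {α β : Type} (P : α → Prop) (f : α → β → α) (l : List β) (a : α)
    (h : P a) (hs : ∀ x b, P x → P (f x b)) : P (l.foldl f a) := by
  induction l generalizing a with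
  | nil => exact h
  | cons b t ih => exact ih (f a b) (hs a b h)

-- a foldl over range(0, b) whose step sets index i (reading the old value at i)
-- rewrites the first b entries and keeps the tail
theorem pv_foldl_update {α : Type} (g : Int → α → α) (d : α) (m : List α) :
    ∀ b : Nat, b ≤ m.length →
      (PySem.List.pyRange 0 (b : Int) 1).foldl
          (fun acc i => PySem.List.pySetD acc i (g i (PySem.List.pyGetD acc i d))) m
        = (List.range b).map (fun k : Nat => g (k : Int) (m.getD k d)) ++ m.drop b := by
  intro b
  induction b with
  | zero => intro _; simp [PySem.List.pyRange_one_eq_nil]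
  | succ b ih =>
    intro hb
    have hb' : b ≤ m.length := Nat.le_of_succ_le hb
    have hbm : b < m.length := hb
    have hcast : ((b + 1 : Nat) : Int) = (b : Int) + 1 := by push_cast; ring
    rw [hcast, PySem.List.pyRange_one_succ_right (by exact_mod_cast Nat.zero_le b),
        List.foldl_append, ih hb']
    set acc := (List.range b).map (fun k : Nat => g (k : Int) (m.getD k d)) ++ m.drop b with hacc
    have hlenpre : ((List.range b).map (fun k : Nat => g (k : Int) (m.getD k d))).length = b := by
      simp
    have hdrop : m.drop b = m[b] :: m.drop (b + 1) := List.drop_eq_getElem_cons hbm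
    have hget : PySem.List.pyGetD acc (b : Int) d = m[b] := by
      rw [PySem.List.pyGetD_natCast, hacc, hdrop]
      rw [List.getD_eq_getElem?_getD, List.getElem?_append_right (by simp)]
      simp [List.getElem?_eq_getElem hbm]
    have hset : PySem.List.pySetD acc (b : Int) (g (b : Int) m[b])
        = (List.range (b + 1)).map (fun k : Nat => g (k : Int) (m.getD k d)) ++ m.drop (b + 1) := by
      rw [PySem.List.pySetD_natCast, hacc, List.set_append_right _ _ (by simp)]
      simp only [hlenpre, Nat.sub_self]
      rw [hdrop, List.set_cons_zero, List.range_succ, List.map_append, List.append_assoc]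
      simp [List.getD_eq_getElem?_getD, List.getElem?_eq_getElem hbm]
    simp only [List.foldl_cons, List.foldl_nil]
    rw [hget, hset]

-- A in closed form: row i, column j carry pvCell
theorem pv_A_closed (num : List Int) :
    game_logic num
      = (PySem.List.pyRange 0 (num.length : Int) 1).map (fun i =>
          (PySem.List.pyRange 0 (num.length : Int) 1).map (fun j =>
            pvCell (num.length : Int) i j)) := by
  set n := num.length with hn
  have hrow : ∀ (i : Int) (r : List String), r.length = n →
      (PySem.List.pyRange 0 (n : Int) 1).foldl
          (fun r j => PySem.List.pySetD r j (pvCell (n : Int) i j)) r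
        = (List.range n).map (fun k : Nat => pvCell (n : Int) i (k : Int)) := by
    intro i r hr
    have h := pv_foldl_update (α := String) (fun j _ => pvCell (n : Int) i j) "" r n (by omega)
    have hdrop : r.drop n = [] := List.drop_eq_nil_of_le (by omega)
    rw [h, hdrop, List.append_nil]
  set init : List (List String) :=
    (PySem.List.pyRange 0 (n : Int) 1).map
      (fun _ => (PySem.List.pyRange 0 (n : Int) 1).map (fun _ => "")) with hinit
  have hinitlen : init.length = n := by simp [hinit, PySem.List.length_pyRange_one]
  have hinitrow : ∀ k : Nat, k < n → (init.getD k []).length = n := by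
    intro k hk
    have hk2 : k < init.length := by omega
    rw [List.getD_eq_getElem?_getD, List.getElem?_eq_getElem hk2]
    simp [hinit, PySem.List.length_pyRange_one]
  have hcongr :
      (PySem.List.pyRange 0 (n : Int) 1).foldl (fun m i =>
        (PySem.List.pyRange 0 (n : Int) 1).foldl (fun m j =>
          PySem.List.pySetD m i
            (PySem.List.pySetD (PySem.List.pyGetD m i []) j (pvCell (n : Int) i j))) m) init
      = (PySem.List.pyRange 0 (n : Int) 1).foldl (fun m i =>
          PySem.List.pySetD m i
            ((PySem.List.pyRange 0 (n : Int) 1).foldl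
              (fun r j => PySem.List.pySetD r j (pvCell (n : Int) i j))
              (PySem.List.pyGetD m i []))) init := by
    apply pv_foldl_congr_inv (P := fun m => m.length = n)
    · exact hinitlen
    · intro x b hx
      show ((PySem.List.pyRange 0 (n : Int) 1).foldl (fun m j =>
        PySem.List.pySetD m b
          (PySem.List.pySetD (PySem.List.pyGetD m b []) j (pvCell (n : Int) b j))) x).length = n
      exact pv_foldl_pres (fun m => m.length = n)
        (fun m j => PySem.List.pySetD m b
          (PySem.List.pySetD (PySem.List.pyGetD m b []) j (pvCell (n : Int) b j)))
        (PySem.List.pyRange 0 (n : Int) 1) x hx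
        (fun y c hy => by
          show (PySem.List.pySetD y b
            (PySem.List.pySetD (PySem.List.pyGetD y b []) c (pvCell (n : Int) b c))).length = n
          rw [PySem.List.length_pySetD]; exact hy)
    · intro x b hbmem hx
      have hb := PySem.List.mem_pyRange_one.mp hbmem
      exact pv_inner_comm b _ _ x hb.1 (by omega)
  have hupd := pv_foldl_update (α := List String)
    (fun i r => (PySem.List.pyRange 0 (n : Int) 1).foldl
      (fun r j => PySem.List.pySetD r j (pvCell (n : Int) i j)) r)
    ([] : List String) init n (by omega)
  have hdropinit : init.drop n = [] := List.drop_eq_nil_of_le (by omega)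
  show (PySem.List.pyRange 0 (n : Int) 1).foldl (fun m i =>
    (PySem.List.pyRange 0 (n : Int) 1).foldl (fun m j =>
      PySem.List.pySetD m i
        (PySem.List.pySetD (PySem.List.pyGetD m i []) j (pvCell (n : Int) i j))) m) init = _
  rw [hcongr, hupd, hdropinit, List.append_nil]
  conv_rhs => rw [PySem.List.pyRange_zero_nat, List.map_map]
  apply List.map_congr_left
  intro k hk
  have hk' : k < n := List.mem_range.mp hk
  beta_reduce
  rw [hrow (k : Int) _ (hinitrow k hk')]
  simp [Function.comp]

-- pvRot is a left rotation by (length - 1)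
theorem pv_rot_eq_rotate (r : List String) : pvRot r = r.rotate (r.length - 1) := by
  cases r with
  | nil => simp [pvRot, PySem.List.slice_from_neg_one, PySem.List.slice_to_neg_one]
  | cons a t =>
      rw [pvRot, PySem.List.slice_from_neg_one, PySem.List.slice_to_neg_one,
          List.rotate_eq_drop_append_take (by omega), List.dropLast_eq_take]

-- iterating pvRot i times on a list of length n rotates left by i*(n-1)
theorem pv_rot_iter (r : List String) (i : Nat) :
    pvRot^[i] r = r.rotate (i * (r.length - 1)) := by
  induction i with
  | zero => simp
  | succ i ih =>
      rw [Function.iterate_succ_apply', ih, pv_rot_eq_rotate, List.length_rotate,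
          List.rotate_rotate]
      ring_nf

-- B's loop: collect the successive iterates of pvRot
theorem pv_B_loop (l : List Int) (m0 : List (List String)) (r0 : List String) :
    l.foldl (fun (st : List (List String) × List String) _ =>
        (st.1 ++ [st.2],
         PySem.List.slice st.2 (some (-1)) none ++ PySem.List.slice st.2 none (some (-1))))
      (m0, r0)
    = (m0 ++ (List.range l.length).map (fun i => pvRot^[i] r0), pvRot^[l.length] r0) := by
  induction l generalizing m0 r0 with
  | nil => simp
  | cons b t ih =>
      simp only [List.foldl_cons]
      have hstep : (PySem.List.slice r0 (some (-1)) none ++ PySem.List.slice r0 none (some (-1)))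
          = pvRot r0 := rfl
      rw [hstep, ih]
      simp only [Prod.mk.injEq]
      constructor
      · rw [List.append_assoc, List.length_cons, List.range_succ_eq_map, List.map_cons,
            List.singleton_append]
        refine congrArg (m0 ++ ·) ?_
        refine List.cons_eq_cons.mpr ⟨rfl, ?_⟩
        rw [List.map_map]
        apply List.map_congr_left
        intro i _
        simp [Function.comp, Function.iterate_succ_apply]
      · rw [List.length_cons, Function.iterate_succ_apply]

-- the element of row 0 at index k
theorem pv_row0_get (n : Nat) (hn : 1 ≤ n) (k : Nat) (hk : k < n) :
    (((["Draw"] ++ List.replicate (n / 2) "Win"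
        ++ List.replicate (n - 1 - n / 2) "Lose") : List String)[k]'(by
          simp only [List.length_append, List.length_replicate, List.length_cons,
            List.length_nil]
          omega))
      = (if k = 0 then "Draw" else if k ≤ n / 2 then "Win" else "Lose") := by
  have hhalf : n / 2 ≤ n - 1 := by omega
  cases k with
  | zero => simp
  | succ m =>
      have hm : m < n - 1 := by omega
      simp only [List.cons_append, List.nil_append, List.getElem_cons_succ]
      by_cases hw : m < n / 2
      · rw [List.getElem_append_left (by simpa using hw)]
        have hle : m + 1 ≤ n / 2 := by omega
        simp [hle]
      · rw [List.getElem_append_right (by simpa using hw)]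
        simp only [List.length_replicate, List.getElem_replicate]
        have : ¬ (m + 1 ≤ n / 2) := by omega
        simp [this]

-- the rotated index equals A's residue, and pvCell matches row 0 there
theorem pv_cell_rot (n : Nat) (hn : 1 ≤ n) (i j : Nat) (hi : i < n) (hj : j < n) :
    pvCell (n : Int) (i : Int) (j : Int)
      = (if (j + i * (n - 1)) % n = 0 then "Draw"
         else if (j + i * (n - 1)) % n ≤ n / 2 then "Win" else "Lose") := by
  have hnpos : (0 : Int) < (n : Int) := by exact_mod_cast hn
  have hmod : PySem.Int.mod ((j : Int) - (i : Int)) (n : Int)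
      = ((j : Int) - (i : Int)) % (n : Int) := PySem.Int.mod_eq_emod_of_pos hnpos
  have hkey : (((j + i * (n - 1)) % n : Nat) : Int) = ((j : Int) - (i : Int)) % (n : Int) := by
    have h1 : ((j + i * (n - 1) : Nat) : Int) = ((j : Int) - (i : Int)) + (n : Int) * (i : Int) := by
      push_cast [Nat.cast_sub hn]
      ring
    rw [Int.natCast_mod, h1, Int.add_mul_emod_self_left]
  set k : Nat := (j + i * (n - 1)) % n with hkdef
  have hkn : k < n := Nat.mod_lt _ (by omega)
  by_cases hij : i = j
  · have hz : ((j : Int) - (i : Int)) % (n : Int) = 0 := by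
      rw [hij]; simp
    have hk0 : k = 0 := by
      have := hkey; rw [hz] at this; exact_mod_cast this
    simp [pvCell, hij, hk0]
  · have hijZ : (i : Int) ≠ (j : Int) := by exact_mod_cast hij
    set e : Int := if (i : Int) < (j : Int) then (j : Int) - i else (j : Int) - i + n with he
    have heb : 1 ≤ e ∧ e < (n : Int) := by
      rw [he]; split_ifs <;> omega
    have hee : ((j : Int) - (i : Int)) % (n : Int) = e := by
      rw [he]
      split_ifs with hlt
      · exact Int.emod_eq_of_lt (by omega) (by omega)
      · rw [← Int.add_mul_emod_self_left (c := 1)]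
        simp only [mul_one]
        exact Int.emod_eq_of_lt (by omega) (by omega)
    have hke : (k : Int) = e := by rw [hkey, hee]
    have hk0 : k ≠ 0 := by omega
    have hfd : PySem.Int.floordiv (n : Int) 2 = ((n / 2 : Nat) : Int) := by
      exact_mod_cast PySem.Int.floordiv_natCast n 2
    have hcond : (PySem.Int.mod ((j : Int) - (i : Int)) (n : Int)
        ≤ PySem.Int.floordiv (n : Int) 2) ↔ (k ≤ n / 2) := by
      rw [hmod, hee, ← hke, hfd]
      exact_mod_cast Iff.rfl
    simp only [pvCell, hijZ, if_false]
    rw [hmod, hee, ← hke, hfd]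
    by_cases hw : k ≤ n / 2
    · rw [if_pos (by exact_mod_cast hw), if_neg hk0, if_pos hw]
    · rw [if_neg (by exact_mod_cast hw : ¬ (k : Int) ≤ ((n / 2 : Nat) : Int)),
          if_neg hk0, if_neg hw]

-- row i of B equals row i of A's closed form
theorem pv_B_row (n : Nat) (hn : 1 ≤ n) (i : Nat) (hi : i < n) :
    pvRot^[i] (["Draw"] ++ List.replicate (n / 2) "Win"
        ++ List.replicate (n - 1 - n / 2) "Lose")
      = (List.range n).map (fun k : Nat => pvCell (n : Int) (i : Int) (k : Int)) := by
  set row0 : List String := ["Draw"] ++ List.replicate (n / 2) "Win"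
      ++ List.replicate (n - 1 - n / 2) "Lose" with hrow0
  have hlen : row0.length = n := by
    simp only [hrow0, List.length_append, List.length_replicate, List.length_cons,
      List.length_nil]
    omega
  rw [pv_rot_iter, hlen]
  apply List.ext_getElem
  · simp [hlen]
  · intro j hj1 hj2
    have hjn : j < n := by simpa [hlen] using hj1
    rw [List.getElem_rotate]
    simp only [List.getElem_map, List.getElem_range, hlen]
    rw [pv_row0_get n hn ((j + i * (n - 1)) % n) (Nat.mod_lt _ (by omega)),
        pv_cell_rot n hn i j hi hjn]

-- ===== VERDICT (by name: the statement is the Claim_ definition above) =====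
theorem game_logic_spec : Claim_equal_game_logic := by
  intro num _
  show game_logic num = game_logic_alt num
  rw [pv_A_closed]
  set n := num.length with hn
  show _ = ((PySem.List.pyRange 0 (n : Int) 1).foldl
      (fun (st : List (List String) × List String) _ =>
        (st.1 ++ [st.2],
         PySem.List.slice st.2 (some (-1)) none ++ PySem.List.slice st.2 none (some (-1))))
      ([], ["Draw"] ++ List.replicate (n / 2) "Win"
            ++ List.replicate (n - 1 - n / 2) "Lose")).1
  rw [pv_B_loop]
  rw [PySem.List.length_pyRange_one]
  cases Nat.eq_zero_or_pos n with
  | inl h0 => simp [h0, PySem.List.pyRange_one_eq_nil]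
  | inr hpos =>
      have hlen : ((n : Int) - 0).toNat = n := by omega
      rw [hlen, List.nil_append, PySem.List.pyRange_zero_nat, List.map_map]
      apply List.ext_getElem
      · simp
      · intro i hi1 hi2
        simp only [List.getElem_map, List.getElem_range, Function.comp]
        rw [pv_B_row n hpos i (by simpa using hi2), List.map_map]
        rfl
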